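-- pv_equiv track=rewrite | github.com/DavidAle8/GenericStuff | projeto/morfologia.py | subtracao
-- ===== SOURCE A (Python) =====
-- from copy import deepcopy
--
-- def complemento(imagem):
--
--     imagem_copia = deepcopy(imagem)
--
--     for i in range(len(imagem_copia)):
--         for j in range(len(imagem_copia[0])):
--             if imagem_copia[i][j] == 1:
--                 imagem_copia[i][j] = 0
--             else:
--                 imagem_copia[i][j] = 1
--
--     return imagem_copia
--
-- def subtracao(imagem_A, imagem_B):
--
--     imagem_final = deepcopy(imagem_A)
--     c_imagem_B = complemento(deepcopy(imagem_B))
--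
--     for i in range(len(imagem_A)):
--         for j in range(len(imagem_A[0])):
--             if imagem_A[i][j] == 1 and c_imagem_B[i][j] == 1:
--                 imagem_final[i][j] = 1
--             else:
--                 imagem_final[i][j] = 0
--     return imagem_final
-- ===== SOURCE B (Python) =====
-- def subtracao(imagem_A, imagem_B):
--     return [[1 if a == 1 and b != 1 else 0 for a, b in zip(linha_A, linha_B)]
--             for linha_A, linha_B in zip(imagem_A, imagem_B)]
-- ===== Notes on version B (the rewrite author's own statement) =====
-- stated objective: simpler
-- what changed: Replaces the two-pass strategy (deepcopy A, complement B in a separate indexed pass, then combine by index with in-place writes) by a single zip-based comprehension that builds the result row by row reading B directly, with no helper, no deepcopy and no index arithmetic.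
-- outside the precondition, e.g. on subtracao([[0]], []): A returns [[0]], B returns []; on subtracao([[1], [1, 7]], [[0], [0]]): A returns [[1], [1, 7]], B returns [[1], [1]]
import Mathlib
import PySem

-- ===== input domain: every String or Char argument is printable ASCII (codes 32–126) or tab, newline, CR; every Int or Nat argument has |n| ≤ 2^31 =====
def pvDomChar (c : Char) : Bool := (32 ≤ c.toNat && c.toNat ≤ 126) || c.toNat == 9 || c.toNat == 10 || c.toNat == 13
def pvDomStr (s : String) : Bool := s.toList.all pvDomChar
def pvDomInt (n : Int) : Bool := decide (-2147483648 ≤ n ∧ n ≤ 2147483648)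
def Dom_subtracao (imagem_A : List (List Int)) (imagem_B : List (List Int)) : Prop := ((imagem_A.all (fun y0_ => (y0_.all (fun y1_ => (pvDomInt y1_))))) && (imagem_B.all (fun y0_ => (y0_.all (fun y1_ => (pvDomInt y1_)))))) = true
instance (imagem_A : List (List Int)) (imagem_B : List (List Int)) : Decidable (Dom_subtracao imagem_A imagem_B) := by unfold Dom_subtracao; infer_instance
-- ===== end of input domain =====

-- B replaces A's two indexed passes (deepcopy + complement helper + combine) by one zip-based
-- row-by-row comprehension reading imagem_B directly; objective: simpler.  A mutates only its
-- private deepcopies, so return values are the whole observable behaviour.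

-- ===== PORT A =====
-- literal port of helper 'complemento': deepcopy, then index loops flipping each cell in place.
-- List.set / pyGetD are total where Python indexing raises; on inputs admitted by Pre_ every
-- index is in range, so the port is exact there.
def complementoPort (imagem : List (List Int)) : List (List Int) :=
  (PySem.List.pyRange 0 (imagem.length : Int) 1).foldl (fun acc i =>
    (PySem.List.pyRange 0 ((PySem.List.pyGetD acc 0 []).length : Int) 1).foldl (fun acc2 j =>
      acc2.set i.toNat ((PySem.List.pyGetD acc2 i []).set j.toNat
        (if PySem.List.pyGetD (PySem.List.pyGetD acc2 i []) j 0 = 1 then 0 else 1))) acc) imagem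

def subtracao (imagem_A : List (List Int)) (imagem_B : List (List Int)) : List (List Int) :=
  let imagem_final := imagem_A                    -- deepcopy(imagem_A)
  let c_imagem_B := complementoPort imagem_B      -- complemento(deepcopy(imagem_B))
  (PySem.List.pyRange 0 (imagem_A.length : Int) 1).foldl (fun acc i =>
    (PySem.List.pyRange 0 ((PySem.List.pyGetD imagem_A 0 []).length : Int) 1).foldl (fun acc2 j =>
      acc2.set i.toNat ((PySem.List.pyGetD acc2 i []).set j.toNat
        (if PySem.List.pyGetD (PySem.List.pyGetD imagem_A i []) j 0 = 1 ∧
            PySem.List.pyGetD (PySem.List.pyGetD c_imagem_B i []) j 0 = 1 then 1 else 0))) acc)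
    imagem_final

-- ===== PORT B =====
def subtracao_alt (imagem_A : List (List Int)) (imagem_B : List (List Int)) : List (List Int) :=
  List.zipWith (fun linha_A linha_B =>
    List.zipWith (fun a b => if a = 1 ∧ b ≠ 1 then 1 else 0) linha_A linha_B) imagem_A imagem_B

-- ===== PRECONDITION & SPEC =====
-- Pre_ restricts to the natural domain of the function: two rectangular images of the same shape.
-- Outside it A usually raises IndexError, and on the ragged/mismatched inputs where A does return,
-- its value copies surplus cells of imagem_A verbatim — an artefact of the deepcopy-then-overwrite
-- construction that no caller of an image-subtraction routine relies on.
def Pre_subtracao (imagem_A : List (List Int)) (imagem_B : List (List Int)) : Prop :=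
  imagem_A.length = imagem_B.length ∧
  (∀ r ∈ imagem_A, r.length = (imagem_A.headD []).length) ∧
  (∀ r ∈ imagem_B, r.length = (imagem_A.headD []).length)
instance (imagem_A : List (List Int)) (imagem_B : List (List Int)) : Decidable (Pre_subtracao imagem_A imagem_B) := by unfold Pre_subtracao; infer_instance

def pvWitness_subtracao : List (List Int) × List (List Int) := ([[1, 0], [0, 1]], [[1, 1], [0, 0]])

def Spec_subtracao (imagem_A : List (List Int)) (imagem_B : List (List Int)) (out : List (List Int)) : Prop := out = subtracao_alt imagem_A imagem_B
instance (imagem_A : List (List Int)) (imagem_B : List (List Int)) (out : List (List Int)) : Decidable (Spec_subtracao imagem_A imagem_B out) := by unfold Spec_subtracao; infer_instance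

-- ===== CLAIM (what is proved, stated in full; the proofs are below) =====
def Claim_equal_subtracao : Prop := ∀ (imagem_A : List (List Int)) (imagem_B : List (List Int)), Dom_subtracao imagem_A imagem_B → Pre_subtracao imagem_A imagem_B → Spec_subtracao imagem_A imagem_B (subtracao imagem_A imagem_B)

-- ===== LEMMAS AND PROOFS =====

-- One pass of the inner 'for j in range(c)' loop over row i: with in-range indices it rewrites
-- the first c cells of row i through w (which may read the not-yet-overwritten cell) and keeps the rest.
theorem pvInnerFold (w : Nat → Int → Int) (i : Nat) :
    ∀ (c : Nat) (g : List (List Int)), i < g.length → c ≤ (g.getD i []).length →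
    (List.range c).foldl
        (fun acc j => acc.set i ((acc.getD i []).set j (w j ((acc.getD i []).getD j 0)))) g
      = g.set i (((List.range c).map (fun j => w j ((g.getD i []).getD j 0))) ++ (g.getD i []).drop c) := by
  intro c
  induction c with
  | zero =>
    intro g hi _
    simp only [List.range_zero, List.foldl_nil, List.map_nil, List.nil_append, List.drop_zero]
    rw [List.getD_eq_getElem _ _ hi]
    exact (List.set_getElem_self hi).symm
  | succ c ih =>
    intro g hi hc
    rw [List.range_succ, List.foldl_append, List.foldl_cons, List.foldl_nil,
        ih g hi (Nat.le_of_succ_le hc)]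
    have hr : c < (g.getD i []).length := hc
    set r := g.getD i [] with hrdef
    set pref := (List.range c).map (fun j => w j (r.getD j 0)) with hprefdef
    have hlenpref : pref.length = c := by simp [hprefdef]
    have hset : ∀ x : List Int, ((g.set i x).getD i []) = x := by
      intro x
      rw [List.getD_eq_getElem _ _ (by simpa using hi)]
      exact List.getElem_set_self (by simpa using hi)
    have hdrop : r.drop c = r.getD c 0 :: r.drop (c + 1) := by
      rw [List.getD_eq_getElem _ _ hr]; exact List.drop_eq_getElem_cons hr
    rw [hset, List.set_set, hdrop]
    congr 1
    have hgetc : (pref ++ r.getD c 0 :: r.drop (c + 1)).getD c 0 = r.getD c 0 := by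
      rw [List.getD_eq_getElem _ _ (by simp [hlenpref])]
      rw [List.getElem_append_right (by omega)]
      simp [hlenpref]
    rw [hgetc, List.set_append, if_neg (by omega : ¬ c < pref.length)]
    simp [hprefdef, List.map_append]

-- The outer 'for i in range(n)' loop with a constant inner bound c, over a rectangular grid.
theorem pvOuterFold (w : Nat → Nat → Int → Int) (c : Nat) :
    ∀ (n : Nat) (g : List (List Int)), n ≤ g.length → (∀ r ∈ g, r.length = c) →
    (List.range n).foldl
        (fun acc i => (List.range c).foldl
          (fun acc2 j => acc2.set i ((acc2.getD i []).set j (w i j ((acc2.getD i []).getD j 0)))) acc) g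
      = (List.range n).map (fun i => (List.range c).map (fun j => w i j ((g.getD i []).getD j 0)))
          ++ g.drop n := by
  intro n
  induction n with
  | zero => intro g _ _; simp
  | succ n ih =>
    intro g hn hrect
    rw [List.range_succ, List.foldl_append, List.foldl_cons, List.foldl_nil,
        ih g (Nat.le_of_succ_le hn) hrect]
    set pref := (List.range n).map (fun i => (List.range c).map (fun j => w i j ((g.getD i []).getD j 0))) with hpref
    have hlenpref : pref.length = n := by simp [hpref]
    have hlen : (pref ++ g.drop n).length = g.length := by simp [hlenpref]; omega
    have hnlt : n < g.length := hn
    have hrow : (pref ++ g.drop n).getD n [] = g.getD n [] := by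
      rw [List.getD_eq_getElem _ _ (by omega), List.getD_eq_getElem _ _ hnlt]
      rw [List.getElem_append_right (by omega)]
      simp [hlenpref]
    have hrowlen : (g.getD n []).length = c := by
      rw [List.getD_eq_getElem _ _ hnlt]
      exact hrect _ (List.getElem_mem hnlt)
    rw [pvInnerFold (w n) n c (pref ++ g.drop n) (by omega) (by rw [hrow, hrowlen])]
    rw [hrow]
    have hdropc : (g.getD n []).drop c = [] := by
      apply List.drop_eq_nil_of_le; omega
    rw [hdropc, List.append_nil]
    rw [List.set_append, if_neg (by omega : ¬ n < pref.length), hlenpref, Nat.sub_self,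
        List.drop_eq_getElem_cons hnlt, List.set_cons_zero, List.map_append]
    simp [hpref]

-- Like pvOuterFold, but with the inner bound read off the current grid's first row
-- (complemento's 'len(imagem_copia[0])'); on a rectangular grid it is constantly c.
theorem pvOuterFoldHead (w : Nat → Nat → Int → Int) (c : Nat) :
    ∀ (n : Nat) (g : List (List Int)), n ≤ g.length → (∀ r ∈ g, r.length = c) →
    (List.range n).foldl
        (fun acc i => (List.range ((acc.getD 0 []).length)).foldl
          (fun acc2 j => acc2.set i ((acc2.getD i []).set j (w i j ((acc2.getD i []).getD j 0)))) acc) g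
      = (List.range n).map (fun i => (List.range c).map (fun j => w i j ((g.getD i []).getD j 0)))
          ++ g.drop n := by
  intro n
  induction n with
  | zero => intro g _ _; simp
  | succ n ih =>
    intro g hn hrect
    rw [List.range_succ, List.foldl_append, List.foldl_cons, List.foldl_nil,
        ih g (Nat.le_of_succ_le hn) hrect]
    set pref := (List.range n).map (fun i => (List.range c).map (fun j => w i j ((g.getD i []).getD j 0))) with hpref
    have hlenpref : pref.length = n := by simp [hpref]
    have hnlt : n < g.length := hn
    have hlen : (pref ++ g.drop n).length = g.length := by simp [hlenpref]; omega
    have hall : ∀ r ∈ pref ++ g.drop n, r.length = c := by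
      intro r hr
      rcases List.mem_append.1 hr with h | h
      · obtain ⟨i, _, rfl⟩ := List.mem_map.1 h
        simp
      · exact hrect r (List.mem_of_mem_drop h)
    have hbound : (((pref ++ g.drop n).getD 0 []).length) = c := by
      rw [List.getD_eq_getElem _ _ (by omega)]
      exact hall _ (List.getElem_mem _)
    rw [hbound]
    have hrow : (pref ++ g.drop n).getD n [] = g.getD n [] := by
      rw [List.getD_eq_getElem _ _ (by omega), List.getD_eq_getElem _ _ hnlt]
      rw [List.getElem_append_right (by omega)]
      simp [hlenpref]
    have hrowlen : (g.getD n []).length = c := by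
      rw [List.getD_eq_getElem _ _ hnlt]
      exact hrect _ (List.getElem_mem hnlt)
    rw [pvInnerFold (w n) n c (pref ++ g.drop n) (by omega) (by rw [hrow, hrowlen])]
    rw [hrow]
    have hdropc : (g.getD n []).drop c = [] := by
      apply List.drop_eq_nil_of_le; omega
    rw [hdropc, List.append_nil]
    rw [List.set_append, if_neg (by omega : ¬ n < pref.length), hlenpref, Nat.sub_self,
        List.drop_eq_getElem_cons hnlt, List.set_cons_zero, List.map_append]
    simp [hpref]

-- complemento of a rectangular image: every cell flipped, stated in index form.
theorem pvComplementoChar (B : List (List Int)) (c : Nat) (hc : ∀ r ∈ B, r.length = c) :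
    complementoPort B
      = (List.range B.length).map (fun i => (List.range c).map
          (fun j => if (B.getD i []).getD j 0 = 1 then 0 else 1)) := by
  unfold complementoPort
  conv_lhs => simp only [PySem.List.pyRange_zero_natCast, List.foldl_map,
    PySem.List.pyGetD_natCast, PySem.List.pyGetD_ofNat', Int.toNat_natCast]
  exact Eq.trans
    (pvOuterFoldHead (fun _ _ x => if x = 1 then 0 else 1) c B.length B le_rfl hc)
    (by simp)

-- the combining pass, in index form, is B's zipWith of rows.
theorem pvFinal (A B : List (List Int)) (c : Nat) (hAB : A.length = B.length)
    (hA : ∀ r ∈ A, r.length = c) (hB : ∀ r ∈ B, r.length = c) :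
    (List.range A.length).map (fun i => (List.range c).map (fun j =>
        if (A.getD i []).getD j 0 = 1 ∧
           (((List.range B.length).map (fun i' => (List.range c).map
               (fun j' => if (B.getD i' []).getD j' 0 = 1 then (0 : Int) else 1))).getD i []).getD j 0 = 1
        then (1 : Int) else 0))
      = List.zipWith (fun linha_A linha_B =>
          List.zipWith (fun a b => if a = 1 ∧ b ≠ 1 then 1 else 0) linha_A linha_B) A B := by
  apply List.ext_getElem
  · simp [hAB]
  · intro i h1 h2
    rw [List.getElem_map, List.getElem_range, List.getElem_zipWith]
    have hi : i < A.length := by simpa using h1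
    have hiB : i < B.length := by omega
    have hrA : A.getD i [] = A[i] := List.getD_eq_getElem _ _ hi
    have hlA : A[i].length = c := hA _ (List.getElem_mem hi)
    have hlB : B[i].length = c := hB _ (List.getElem_mem hiB)
    have hMi : (((List.range B.length).map (fun i' => (List.range c).map
        (fun j' => if (B.getD i' []).getD j' 0 = 1 then (0 : Int) else 1))).getD i [])
        = (List.range c).map (fun j' => if (B.getD i []).getD j' 0 = 1 then (0 : Int) else 1) := by
      rw [List.getD_eq_getElem _ _ (by simpa using hiB)]
      simp
    rw [hMi]
    apply List.ext_getElem
    · simp [hlA, hlB]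
    · intro j hj1 hj2
      have hjc : j < c := by simpa using hj1
      rw [List.getElem_map, List.getElem_range, List.getElem_zipWith]
      have h1 : (A.getD i []).getD j 0 = A[i][j]'(by omega) := by
        rw [hrA]; exact List.getD_eq_getElem _ _ (by omega)
      have h2 : ((List.range c).map (fun j' => if (B.getD i []).getD j' 0 = 1 then (0 : Int) else 1)).getD j 0
          = (if (B[i]'hiB)[j]'(by omega) = 1 then 0 else 1) := by
        rw [List.getD_eq_getElem _ _ (by simpa using hjc), List.getElem_map, List.getElem_range,
            List.getD_eq_getElem _ _ hiB, List.getD_eq_getElem _ _ (show j < (B[i]'hiB).length by omega)]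
      rw [h1, h2]
      by_cases hb : (B[i]'hiB)[j]'(by omega) = 1 <;> simp [hb]

-- ===== VERDICT (by name: the statement is the Claim_ definition above) =====
theorem subtracao_spec : Claim_equal_subtracao := by
  intro imagem_A imagem_B _ hpre
  obtain ⟨hAB, hA, hB⟩ := hpre
  unfold Spec_subtracao subtracao subtracao_alt
  dsimp only
  rw [pvComplementoChar imagem_B ((imagem_A.headD []).length) hB]
  conv_lhs => simp only [PySem.List.pyRange_zero_natCast, List.foldl_map,
    PySem.List.pyGetD_natCast, PySem.List.pyGetD_ofNat', Int.toNat_natCast]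
  have hhead : imagem_A.getD 0 [] = imagem_A.headD [] := by cases imagem_A <;> simp
  rw [hhead]
  refine Eq.trans (pvOuterFold (fun i j _ =>
    if (imagem_A.getD i []).getD j 0 = 1 ∧
       (((List.range imagem_B.length).map (fun i' => (List.range ((imagem_A.headD []).length)).map
           (fun j' => if (imagem_B.getD i' []).getD j' 0 = 1 then 0 else 1))).getD i []).getD j 0 = 1
    then (1 : Int) else 0) ((imagem_A.headD []).length) imagem_A.length imagem_A le_rfl hA) ?_
  rw [List.drop_length, List.append_nil]
  simpa only [] using pvFinal imagem_A imagem_B ((imagem_A.headD []).length) hAB hA hB
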